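-- pv_equiv track=rewrite | github.com/giorgossideris/verl | evals/oe_mc_eval_05_02_26/eval_utils.py | find_explicit_cli_flags
-- ===== SOURCE A (Python) =====
-- from typing import Any, Dict, Iterable, List, Literal, Optional, Sequence, Tuple
--
-- def find_explicit_cli_flags(argv: Sequence[str], flags: Sequence[str]) -> List[str]:
--     flag_set = set(flags)
--     explicit: set[str] = set()
--     for token in argv:
--         if not token.startswith("--"):
--             continue
--         option = token.split("=", 1)[0]
--         if option in flag_set:
--             explicit.add(option)
--     return sorted(explicit)
-- ===== SOURCE B (Python) =====
-- def find_explicit_cli_flags(argv, flags):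
--     def mentioned(f):
--         return any(tok.startswith("--") and tok.split("=", 1)[0] == f for tok in argv)
--     return [f for f in sorted(set(flags)) if mentioned(f)]
-- ===== Notes on version B (the rewrite author's own statement) =====
-- stated objective: simpler
-- what changed: B inverts the traversal: instead of one pass over argv accumulating a set and sorting it at the end, B sorts the deduplicated flags first and keeps each flag that some argv token explicitly mentions (a scan per flag); no accumulator set is maintained.
import Mathlib
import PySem

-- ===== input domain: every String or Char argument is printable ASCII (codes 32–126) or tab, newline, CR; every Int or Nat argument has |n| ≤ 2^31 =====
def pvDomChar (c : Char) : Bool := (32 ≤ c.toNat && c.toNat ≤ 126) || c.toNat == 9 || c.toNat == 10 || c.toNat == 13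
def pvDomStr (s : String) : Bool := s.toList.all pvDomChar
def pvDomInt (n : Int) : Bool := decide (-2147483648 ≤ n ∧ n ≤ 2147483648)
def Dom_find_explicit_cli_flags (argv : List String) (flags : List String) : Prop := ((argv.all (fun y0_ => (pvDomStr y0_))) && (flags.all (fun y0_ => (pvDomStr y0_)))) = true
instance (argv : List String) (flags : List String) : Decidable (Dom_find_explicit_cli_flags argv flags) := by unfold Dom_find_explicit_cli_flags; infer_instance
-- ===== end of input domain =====

-- B changes only the decomposition (flag-major nested scan instead of argv-major set accumulation); objective: simpler.

-- ===== PORT A =====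
-- token.split("=", 1)[0] — the [0] always exists in Python, so we take the head (exact)
def pvOptOf (token : String) : String :=
  match PySem.Str.splitMax? token "=" 1 with
  | some (h :: _) => h
  | _ => ""

def find_explicit_cli_flags (argv : List String) (flags : List String) : List String :=
  let flag_set := PySem.Set.ofList flags
  let explicit := argv.foldl (fun ex token =>
    if !(PySem.Str.startswith token "--") then ex
    else
      let option := pvOptOf token
      if PySem.Set.contains flag_set option then PySem.Set.add ex option else ex)
    PySem.Set.empty
  PySem.List.sorted explicit (fun x => x) false

-- ===== PORT B =====
def find_explicit_cli_flags_alt (argv : List String) (flags : List String) : List String :=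
  (PySem.List.sorted (PySem.Set.ofList flags) (fun x => x) false).filter
    (fun f => argv.any (fun tok => PySem.Str.startswith tok "--" && pvOptOf tok == f))

-- ===== PRECONDITION & SPEC =====
def Spec_find_explicit_cli_flags (argv : List String) (flags : List String) (out : List String) : Prop := out = find_explicit_cli_flags_alt argv flags
instance (argv : List String) (flags : List String) (out : List String) : Decidable (Spec_find_explicit_cli_flags argv flags out) := by unfold Spec_find_explicit_cli_flags; infer_instance

-- ===== CLAIM (what is proved, stated in full; the proofs are below) =====
def Claim_equal_find_explicit_cli_flags : Prop := ∀ (argv : List String) (flags : List String), Dom_find_explicit_cli_flags argv flags → Spec_find_explicit_cli_flags argv flags (find_explicit_cli_flags argv flags)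

-- ===== LEMMAS AND PROOFS =====

-- the loop step of A
def pvStep (flags : List String) (ex : PySem.Set String) (token : String) : PySem.Set String :=
  if !(PySem.Str.startswith token "--") then ex
  else if PySem.Set.contains (PySem.Set.ofList flags) (pvOptOf token) then PySem.Set.add ex (pvOptOf token) else ex

theorem pvStep_nodup (flags : List String) (ex : PySem.Set String) (token : String)
    (h : ex.Nodup) : (pvStep flags ex token).Nodup := by
  unfold pvStep
  split_ifs <;> first | exact h | exact PySem.Set.nodup_add _ _ h

theorem pv_foldl_nodup (flags : List String) (argv : List String) (ex : PySem.Set String)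
    (h : ex.Nodup) : (argv.foldl (pvStep flags) ex).Nodup := by
  induction argv generalizing ex with
  | nil => exact h
  | cons t ts ih => exact ih _ (pvStep_nodup flags ex t h)

theorem pv_mem_foldl (flags : List String) (argv : List String) (ex : PySem.Set String) (x : String) :
    x ∈ argv.foldl (pvStep flags) ex ↔
      x ∈ ex ∨ ∃ tok ∈ argv, PySem.Str.startswith tok "--" = true ∧ pvOptOf tok = x ∧ x ∈ flags := by
  induction argv generalizing ex with
  | nil => simp
  | cons t ts ih =>
    rw [List.foldl_cons, ih]
    unfold pvStep
    split_ifs with h1 h2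
    · simp only [Bool.not_eq_true'] at h1
      constructor
      · rintro (hx | ⟨tok, ht, h⟩)
        · exact Or.inl hx
        · exact Or.inr ⟨tok, List.mem_cons_of_mem _ ht, h⟩
      · rintro (hx | ⟨tok, ht, hsw, rest⟩)
        · exact Or.inl hx
        · rcases List.mem_cons.mp ht with rfl | ht
          · rw [hsw] at h1; cases h1
          · exact Or.inr ⟨tok, ht, hsw, rest⟩
    · simp only [Bool.not_eq_true', Bool.not_eq_false] at h1
      rw [PySem.Set.mem_add]
      constructor
      · rintro ((hx | rfl) | ⟨tok, ht, h⟩)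
        · exact Or.inl hx
        · refine Or.inr ⟨t, List.mem_cons_self, h1, rfl, ?_⟩
          exact (PySem.Set.mem_ofList _ _).mp ((PySem.Set.contains_iff _ _).mp h2)
        · exact Or.inr ⟨tok, List.mem_cons_of_mem _ ht, h⟩
      · rintro (hx | ⟨tok, ht, hsw, hopt, hfl⟩)
        · exact Or.inl (Or.inl hx)
        · rcases List.mem_cons.mp ht with rfl | ht
          · exact Or.inl (Or.inr hopt.symm)
          · exact Or.inr ⟨tok, ht, hsw, hopt, hfl⟩
    · simp only [Bool.not_eq_true', Bool.not_eq_false] at h1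
      constructor
      · rintro (hx | ⟨tok, ht, h⟩)
        · exact Or.inl hx
        · exact Or.inr ⟨tok, List.mem_cons_of_mem _ ht, h⟩
      · rintro (hx | ⟨tok, ht, hsw, hopt, hfl⟩)
        · exact Or.inl hx
        · rcases List.mem_cons.mp ht with rfl | ht
          · exfalso
            exact h2 ((PySem.Set.contains_iff _ _).mpr (hopt ▸ (PySem.Set.mem_ofList _ _).mpr hfl))
          · exact Or.inr ⟨tok, ht, hsw, hopt, hfl⟩

theorem pv_mem_alt (argv flags : List String) (x : String) :
    x ∈ find_explicit_cli_flags_alt argv flags ↔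
      ∃ tok ∈ argv, PySem.Str.startswith tok "--" = true ∧ pvOptOf tok = x ∧ x ∈ flags := by
  unfold find_explicit_cli_flags_alt
  rw [List.mem_filter, PySem.List.mem_sorted, PySem.Set.mem_ofList]
  simp only [List.any_eq_true, Bool.and_eq_true, beq_iff_eq]
  constructor
  · rintro ⟨hfl, tok, ht, hsw, hopt⟩
    exact ⟨tok, ht, hsw, hopt, hfl⟩
  · rintro ⟨tok, ht, hsw, hopt, hfl⟩
    exact ⟨hfl, tok, ht, hsw, hopt⟩

theorem pv_alt_pairwise (argv flags : List String) :
    (find_explicit_cli_flags_alt argv flags).Pairwise (· < ·) := by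
  unfold find_explicit_cli_flags_alt
  exact List.Pairwise.filter _ (PySem.List.sorted_ofList_pairwise_lt flags)

-- ===== VERDICT (by name: the statement is the Claim_ definition above) =====
theorem find_explicit_cli_flags_spec : Claim_equal_find_explicit_cli_flags := by
  intro argv flags _
  unfold Spec_find_explicit_cli_flags
  show PySem.List.sorted (argv.foldl (pvStep flags) PySem.Set.empty) (fun x => x) false =
    find_explicit_cli_flags_alt argv flags
  have hnodupA : (argv.foldl (pvStep flags) PySem.Set.empty).Nodup :=
    pv_foldl_nodup flags argv _ List.nodup_nil
  have hnodupB : (find_explicit_cli_flags_alt argv flags).Nodup := by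
    unfold find_explicit_cli_flags_alt
    exact List.Nodup.filter _
      (((PySem.List.sorted_perm (PySem.Set.ofList flags) (fun x => x) false).nodup_iff).mpr
        (PySem.Set.nodup_ofList flags))
  have hperm : (find_explicit_cli_flags_alt argv flags).Perm (argv.foldl (pvStep flags) PySem.Set.empty) := by
    rw [List.perm_ext_iff_of_nodup hnodupB hnodupA]
    intro x
    rw [pv_mem_alt, pv_mem_foldl]
    simp
  exact PySem.List.sorted_eq_of_perm_of_pairwise_lt _ _ _ hperm (pv_alt_pairwise argv flags)
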